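-- pv_equiv track=rewrite | github.com/Twyla123/AML_Final_Project | Testing_connecting_frontback/backend/agent_core.py | filter_price_relevant_news
-- ===== SOURCE A (Python) =====
-- def score_price_relevance(item: dict, ticker: str) -> int:
--     text = " ".join([str(item.get("headline","")), str(item.get("summary",""))]).lower()
--     score = 0
--     high = ["earnings", "guidance", "revenue", "profit", "sec", "antitrust", "upgrade"]
--     for w in high:
--         if w in text: score += 3
--     if ticker.lower() in text: score += 2
--     return score
--
-- def filter_price_relevant_news(items: list, ticker: str, max_items: int = 8, min_score: int = 3):
--     scored = []
--     for it in items: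
--         if "error" in it: continue
--         s = score_price_relevance(it, ticker)
--         scored.append((s, it))
--     scored.sort(key=lambda x: x[0], reverse=True)
--     strong = [it for s, it in scored if s >= min_score]
--     if strong: return strong[:max_items]
--     return [it for s, it in scored][:max_items]
-- ===== SOURCE B (Python) =====
-- HIGH = ("earnings", "guidance", "revenue", "profit", "sec", "antitrust", "upgrade")
--
-- def _score(item: dict, ticker: str) -> int:
--     text = (str(item.get("headline", "")) + " " + str(item.get("summary", ""))).lower()
--     return 3 * len([w for w in HIGH if w in text]) + (2 if ticker.lower() in text else 0)
--
-- def filter_price_relevant_news(items: list, ticker: str, max_items: int = 8, min_score: int = 3):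
--     # Scores always lie in 0..23, so a descending counting scan over score
--     # classes replaces the comparison sort; each class keeps input order (stable).
--     kept = [(_score(it, ticker), it) for it in items if "error" not in it]
--     strong = [it for s in range(23, max(min_score, 0) - 1, -1) for sc, it in kept if sc == s]
--     if strong:
--         return strong[:max_items]
--     return [it for s in range(23, -1, -1) for sc, it in kept if sc == s][:max_items]
-- ===== Notes on version B (the rewrite author's own statement) =====
-- stated objective: alternative
-- what changed: Replaces the stable comparison sort plus post-filter with a counting-sort-style descending scan over the 24 possible score classes (0..23), collecting each class in input order; the strong branch scans only classes >= min_score.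
import Mathlib
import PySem

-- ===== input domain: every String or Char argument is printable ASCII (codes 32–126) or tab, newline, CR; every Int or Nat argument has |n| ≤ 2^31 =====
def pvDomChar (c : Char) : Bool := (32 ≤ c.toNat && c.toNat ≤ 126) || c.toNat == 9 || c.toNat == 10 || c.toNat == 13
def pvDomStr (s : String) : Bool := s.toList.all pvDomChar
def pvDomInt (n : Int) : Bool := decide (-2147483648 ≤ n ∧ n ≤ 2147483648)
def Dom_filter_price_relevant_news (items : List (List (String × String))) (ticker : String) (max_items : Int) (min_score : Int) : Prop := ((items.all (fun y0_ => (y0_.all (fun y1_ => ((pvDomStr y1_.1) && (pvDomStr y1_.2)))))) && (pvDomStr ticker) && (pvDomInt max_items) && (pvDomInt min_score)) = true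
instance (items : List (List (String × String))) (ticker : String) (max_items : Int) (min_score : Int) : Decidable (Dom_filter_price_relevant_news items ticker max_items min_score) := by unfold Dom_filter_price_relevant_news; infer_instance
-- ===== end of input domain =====

-- B replaces A's stable sort + post-filter by a counting-sort-style descending scan over the 24 possible score classes (objective: alternative algorithm, same observable result).

-- ===== PORT A =====
def pvHigh : List String := ["earnings", "guidance", "revenue", "profit", "sec", "antitrust", "upgrade"]

def score_price_relevance (item : List (String × String)) (ticker : String) : Int :=
  let text := PySem.Str.lower (PySem.Str.join " "
    [(PySem.Dict.mk item).getD "headline" "", (PySem.Dict.mk item).getD "summary" ""])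
  let score : Int := pvHigh.foldl (fun sc w => if PySem.Str.isIn w text then sc + 3 else sc) 0
  if PySem.Str.isIn (PySem.Str.lower ticker) text then score + 2 else score

def filter_price_relevant_news (items : List (List (String × String))) (ticker : String) (max_items : Int) (min_score : Int) : List (List (String × String)) :=
  let scored := items.foldl (fun acc it =>
      if (PySem.Dict.mk it).contains "error" then acc
      else acc ++ [(score_price_relevance it ticker, it)])
    ([] : List (Int × List (String × String)))
  let sortedScored := PySem.List.sorted scored (fun x => x.1) true
  let strong := sortedScored.foldl (fun acc x => if min_score ≤ x.1 then acc ++ [x.2] else acc) []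
  if strong ≠ [] then PySem.List.slice strong none (some max_items)
  else PySem.List.slice (sortedScored.foldl (fun acc x => acc ++ [x.2]) []) none (some max_items)

-- ===== PORT B =====
def pvHighAlt : List String := ["earnings", "guidance", "revenue", "profit", "sec", "antitrust", "upgrade"]

def pvScoreAlt (item : List (String × String)) (ticker : String) : Int :=
  let text := PySem.Str.lower
    ((PySem.Dict.mk item).getD "headline" "" ++ " " ++ (PySem.Dict.mk item).getD "summary" "")
  3 * (((pvHighAlt.filter (fun w => PySem.Str.isIn w text)).length : Int))
    + (if PySem.Str.isIn (PySem.Str.lower ticker) text then 2 else 0)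

def filter_price_relevant_news_alt (items : List (List (String × String))) (ticker : String) (max_items : Int) (min_score : Int) : List (List (String × String)) :=
  let kept := (items.filter (fun it => !((PySem.Dict.mk it).contains "error"))).map
      (fun it => (pvScoreAlt it ticker, it))
  let strong := (PySem.List.pyRange 23 (max min_score 0 - 1) (-1)).flatMap
      (fun s => (kept.filter (fun p => p.1 == s)).map (fun p => p.2))
  if strong ≠ [] then PySem.List.slice strong none (some max_items)
  else PySem.List.slice ((PySem.List.pyRange 23 (-1) (-1)).flatMap
      (fun s => (kept.filter (fun p => p.1 == s)).map (fun p => p.2))) none (some max_items)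

-- ===== PRECONDITION & SPEC =====
def Spec_filter_price_relevant_news (items : List (List (String × String))) (ticker : String) (max_items : Int) (min_score : Int) (out : List (List (String × String))) : Prop := out = filter_price_relevant_news_alt items ticker max_items min_score
instance (items : List (List (String × String))) (ticker : String) (max_items : Int) (min_score : Int) (out : List (List (String × String))) : Decidable (Spec_filter_price_relevant_news items ticker max_items min_score out) := by unfold Spec_filter_price_relevant_news; infer_instance

-- ===== CLAIM (what is proved, stated in full; the proofs are below) =====
def Claim_equal_filter_price_relevant_news : Prop := ∀ (items : List (List (String × String))) (ticker : String) (max_items : Int) (min_score : Int), Dom_filter_price_relevant_news items ticker max_items min_score → Spec_filter_price_relevant_news items ticker max_items min_score (filter_price_relevant_news items ticker max_items min_score)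

-- ===== LEMMAS AND PROOFS =====

-- " ".join([a, b]) is a + " " + b
lemma join_pair (a b : String) : PySem.Str.join " " [a, b] = a ++ " " ++ b := by
  simp [PySem.Str.join, PySem.Chars.join, List.intercalate]
  rw [show ((' ' : Char) :: b.toList) = " ".toList ++ b.toList from rfl]
  rw [String.ofList_append]
  simp [String.append_assoc]

-- the scores A's sort can see, listed in descending order
def pvDesc : List Int := [23,22,21,20,19,18,17,16,15,14,13,12,11,10,9,8,7,6,5,4,3,2,1,0]

lemma pvDesc_eq_range : PySem.List.pyRange 23 (-1) (-1) = pvDesc := by decide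

lemma mem_pvDesc (s : Int) : s ∈ pvDesc ↔ 0 ≤ s ∧ s < 24 := by
  simp only [pvDesc, List.mem_cons, List.not_mem_nil, or_false]
  omega

lemma pvDesc_pairwise : pvDesc.Pairwise (· > ·) := by decide

-- the keyword fold is 3 times the number of matching keywords
lemma foldl_score_len (f : String -> Bool) :
    forall (ws : List String) (a : Int),
    ws.foldl (fun sc w => if f w then sc + 3 else sc) a
      = a + 3 * (((ws.filter f).length : Int)) := by
  intro ws
  induction ws with
  | nil => intro a; simp
  | cons w t ih =>
    intro a
    cases h : f w <;>
      simp only [List.foldl_cons, List.filter_cons, h, Bool.false_eq_true, if_false, if_true,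
        List.length_cons, ih] <;> push_cast <;> ring

-- pure arithmetic shape shared by the two score computations, conditions abstracted away
lemma score_arith (f : String -> Bool) (b : Bool) :
    3 * (((pvHighAlt.filter f).length : Int)) + (if b then (2 : Int) else 0)
    = (if b then (pvHigh.foldl (fun sc w => if f w then sc + 3 else sc) 0) + 2
       else pvHigh.foldl (fun sc w => if f w then sc + 3 else sc) 0) := by
  have he : pvHighAlt = pvHigh := rfl
  rw [he, foldl_score_len f pvHigh 0]
  cases b <;> simp

lemma score_arith_bounds (f : String -> Bool) (b : Bool) :
    0 ≤ (if b then (pvHigh.foldl (fun sc w => if f w then sc + 3 else sc) (0 : Int)) + 2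
         else pvHigh.foldl (fun sc w => if f w then sc + 3 else sc) (0 : Int)) ∧
    (if b then (pvHigh.foldl (fun sc w => if f w then sc + 3 else sc) (0 : Int)) + 2
     else pvHigh.foldl (fun sc w => if f w then sc + 3 else sc) (0 : Int)) < 24 := by
  have hlen : (pvHigh.filter f).length ≤ 7 := List.length_filter_le f pvHigh
  rw [foldl_score_len f pvHigh 0]
  cases b <;> simp <;> omega

-- B's score helper computes A's score
lemma pvScoreAlt_eq (item : List (String × String)) (ticker : String) :
    pvScoreAlt item ticker = score_price_relevance item ticker := by
  unfold pvScoreAlt score_price_relevance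
  rw [show ((PySem.Dict.mk item).getD "headline" "" ++ " " ++ (PySem.Dict.mk item).getD "summary" "")
      = PySem.Str.join " " [(PySem.Dict.mk item).getD "headline" "", (PySem.Dict.mk item).getD "summary" ""]
    from (join_pair _ _).symm]
  exact score_arith
    (fun w => PySem.Str.isIn w (PySem.Str.lower (PySem.Str.join " "
      [(PySem.Dict.mk item).getD "headline" "", (PySem.Dict.mk item).getD "summary" ""])))
    (PySem.Str.isIn (PySem.Str.lower ticker) (PySem.Str.lower (PySem.Str.join " "
      [(PySem.Dict.mk item).getD "headline" "", (PySem.Dict.mk item).getD "summary" ""])))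

lemma score_bounds (item : List (String × String)) (ticker : String) :
    0 ≤ score_price_relevance item ticker ∧ score_price_relevance item ticker < 24 := by
  exact score_arith_bounds
    (fun w => PySem.Str.isIn w (PySem.Str.lower (PySem.Str.join " "
      [(PySem.Dict.mk item).getD "headline" "", (PySem.Dict.mk item).getD "summary" ""])))
    (PySem.Str.isIn (PySem.Str.lower ticker) (PySem.Str.lower (PySem.Str.join " "
      [(PySem.Dict.mk item).getD "headline" "", (PySem.Dict.mk item).getD "summary" ""])))

-- inserting x before a list every element of which x "beats" puts x in front
lemma insertBy_all_before {alpha : Type} (before : alpha -> alpha -> Bool) (x : alpha) (ys : List alpha)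
    (h : forall y, y ∈ ys -> before x y = true) :
    PySem.List.insertBy before x ys = x :: ys := by
  cases ys with
  | nil => rfl
  | cons y t =>
    have hy := h y (List.mem_cons_self)
    simp [PySem.List.insertBy, hy]

lemma insertBy_append_left {alpha : Type} (before : alpha -> alpha -> Bool) (x : alpha) (l1 l2 : List alpha)
    (h : forall y, y ∈ l1 -> before x y = false) :
    PySem.List.insertBy before x (l1 ++ l2) = l1 ++ PySem.List.insertBy before x l2 := by
  induction l1 with
  | nil => rfl
  | cons y t ih =>
    have hy := h y (List.mem_cons_self)
    simp only [List.cons_append, PySem.List.insertBy, hy, Bool.false_eq_true, if_false]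
    rw [ih (fun z hz => h z (List.mem_cons_of_mem _ hz))]

-- one stable insertion into the class-wise concatenation appends to x's own class
lemma ins_flat {alpha : Type} (x : Int × alpha) :
    forall (ss : List Int), ss.Pairwise (· > ·) -> x.1 ∈ ss -> forall (xs : List (Int × alpha)),
    PySem.List.insertBy (fun a b => decide (b.1 < a.1)) x
        (ss.flatMap (fun s => xs.filter (fun p => decide (p.1 = s)))) =
    ss.flatMap (fun s => (xs ++ [x]).filter (fun p => decide (p.1 = s))) := by
  intro ss
  induction ss with
  | nil => intro _ hmem; exact absurd hmem (List.not_mem_nil)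
  | cons s t ih =>
    intro hp hmem xs
    obtain ⟨h1, h2⟩ := List.pairwise_cons.mp hp
    simp only [List.flatMap_cons]
    by_cases hx : x.1 = s
    · have hfb : forall y, y ∈ xs.filter (fun p => decide (p.1 = s)) ->
          (fun (a b : Int × alpha) => decide (b.1 < a.1)) x y = false := by
        intro y hy
        have hys : y.1 = s := by simpa using (List.of_mem_filter hy)
        simp [hys, hx]
      rw [insertBy_append_left _ _ _ _ hfb]
      have hrest : forall y, y ∈ t.flatMap (fun u => xs.filter (fun p => decide (p.1 = u))) ->
          (fun (a b : Int × alpha) => decide (b.1 < a.1)) x y = true := by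
        intro y hy
        obtain ⟨u, hu, hyf⟩ := List.mem_flatMap.mp hy
        have hyu : y.1 = u := by simpa using (List.of_mem_filter hyf)
        have hsu := h1 u hu
        simp only [decide_eq_true_eq, hyu, hx]
        omega
      rw [insertBy_all_before _ _ _ hrest]
      have hs : (xs ++ [x]).filter (fun p => decide (p.1 = s)) =
          xs.filter (fun p => decide (p.1 = s)) ++ [x] := by
        simp [List.filter_append, hx]
      have ht : t.flatMap (fun u => (xs ++ [x]).filter (fun p => decide (p.1 = u))) =
          t.flatMap (fun u => xs.filter (fun p => decide (p.1 = u))) := by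
        refine List.flatMap_congr (fun u hu => ?_)
        have hne : ¬ (x.1 = u) := by have := h1 u hu; omega
        simp [List.filter_append, hne]
      rw [hs, ht, List.append_assoc]
      rfl
    · have hxt : x.1 ∈ t := (List.mem_cons.mp hmem).resolve_left hx
      have hfb : forall y, y ∈ xs.filter (fun p => decide (p.1 = s)) ->
          (fun (a b : Int × alpha) => decide (b.1 < a.1)) x y = false := by
        intro y hy
        have hys : y.1 = s := by simpa using (List.of_mem_filter hy)
        have := h1 _ hxt
        simp only [decide_eq_false_iff_not, hys]
        omega
      rw [insertBy_append_left _ _ _ _ hfb, ih h2 hxt xs]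
      have hs : (xs ++ [x]).filter (fun p => decide (p.1 = s)) =
          xs.filter (fun p => decide (p.1 = s)) := by
        simp [List.filter_append, hx]
      rw [hs]

-- folding stable insertions over xs produces the class-wise concatenation
lemma foldl_ins {alpha : Type} (ss : List Int) (hp : ss.Pairwise (· > ·)) :
    forall (xs ys : List (Int × alpha)), (forall p, p ∈ xs -> p.1 ∈ ss) ->
    xs.foldl (fun acc x => PySem.List.insertBy (fun a b => decide (b.1 < a.1)) x acc)
        (ss.flatMap (fun s => ys.filter (fun p => decide (p.1 = s)))) =
    ss.flatMap (fun s => (ys ++ xs).filter (fun p => decide (p.1 = s))) := by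
  intro xs
  induction xs with
  | nil => intro ys _; simp
  | cons x t ih =>
    intro ys h
    simp only [List.foldl_cons]
    rw [ins_flat x ss hp (h x List.mem_cons_self) ys,
        ih (ys ++ [x]) (fun p hp' => h p (List.mem_cons_of_mem _ hp')), List.append_assoc]
    rfl

-- A's stable descending sort is the class-wise concatenation
lemma sorted_eq_flatMap {alpha : Type} (xs : List (Int × alpha)) (ss : List Int)
    (hp : ss.Pairwise (· > ·)) (h : forall p, p ∈ xs -> p.1 ∈ ss) :
    PySem.List.sorted xs (fun x => x.1) true =
    ss.flatMap (fun s => xs.filter (fun p => decide (p.1 = s))) := by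
  rw [PySem.List.sorted_rev_eq_foldl_insertBy]
  have h0 : ss.flatMap (fun s => (([] : List (Int × alpha)).filter (fun p => decide (p.1 = s)))) = [] := by
    simp
  have hmain := foldl_ins ss hp xs [] h
  rw [h0] at hmain
  simpa using hmain

-- 'if c(x): continue else append' is a filtered map
lemma foldl_skip {alpha beta : Type} (c : alpha -> Bool) (f : alpha -> beta) (l : List alpha) (acc : List beta) :
    l.foldl (fun acc x => if c x then acc else acc ++ [f x]) acc =
    acc ++ (l.filter (fun x => !c x)).map f := by
  have hfun : (fun (acc : List beta) x => if c x then acc else acc ++ [f x])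
      = (fun acc x => if (!c x) = true then acc ++ [f x] else acc) := by
    funext acc x
    cases c x
    · simp only [Bool.false_eq_true, if_false, Bool.not_false, if_true]
    · simp only [if_true, Bool.not_true, Bool.false_eq_true, if_false]
  rw [hfun]
  exact PySem.List.foldl_append_if _ _ _ _

-- the canonical score class: kept items of score s, in input order
def pvBucket (items : List (List (String × String))) (ticker : String) (s : Int) :
    List (List (String × String)) :=
  items.filter (fun it => !(PySem.Dict.mk it).contains "error"
                          && decide (score_price_relevance it ticker = s))

-- A's sorted-filter-map pipeline, class by class (scoring kept abstract)
lemma pieceA_gen {gamma : Type} (K : List gamma) (sc : gamma -> Int) (err : gamma -> Bool)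
    (min_score s : Int) :
    ((((K.filter (fun it => !err it)).map (fun it => (sc it, it))).filter
          (fun p => decide (p.1 = s))).filter
            (fun p => decide (min_score ≤ p.1))).map (fun x => x.2) =
    if min_score ≤ s then K.filter (fun it => !err it && decide (sc it = s)) else [] := by
  rw [List.filter_map, List.filter_map, List.map_map, List.filter_filter, List.filter_filter]
  rw [show ((fun (x : Int × gamma) => x.2) ∘ (fun it => (sc it, it))) = id from rfl, List.map_id]
  by_cases hms : min_score ≤ s
  · rw [if_pos hms]
    refine List.filter_congr (fun it _ => ?_)
    dsimp only [Function.comp]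
    by_cases hsc : sc it = s
    · simp [hsc, hms]
    · simp [hsc]
  · rw [if_neg hms]
    refine List.filter_eq_nil_iff.mpr (fun it _ => ?_)
    dsimp only [Function.comp]
    simp only [Bool.and_eq_true, decide_eq_true_eq, not_and]
    intro hle hsc
    omega

lemma pieceA_gen_noguard {gamma : Type} (K : List gamma) (sc : gamma -> Int) (err : gamma -> Bool)
    (s : Int) :
    (((K.filter (fun it => !err it)).map (fun it => (sc it, it))).filter
          (fun p => decide (p.1 = s))).map (fun x => x.2) =
    K.filter (fun it => !err it && decide (sc it = s)) := by
  rw [List.filter_map, List.map_map, List.filter_filter]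
  rw [show ((fun (x : Int × gamma) => x.2) ∘ (fun it => (sc it, it))) = id from rfl, List.map_id]
  refine List.filter_congr (fun it _ => ?_)
  dsimp only [Function.comp]
  exact Bool.and_comm _ _

-- B's class extraction for one score value is the canonical class
lemma pieceB (items : List (List (String × String))) (ticker : String) (s : Int) :
    ((((items.filter (fun it => !((PySem.Dict.mk it).contains "error"))).map
        (fun it => (score_price_relevance it ticker, it))).filter
          (fun p => p.1 == s)).map (fun p => p.2))
      = pvBucket items ticker s := by
  rw [show (fun (p : Int × List (String × String)) => p.1 == s)
      = (fun p => decide (p.1 = s)) from funext (fun p => beq_eq_decide _ _)]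
  exact pieceA_gen_noguard items (fun it => score_price_relevance it ticker)
    (fun it => (PySem.Dict.mk it).contains "error") s

-- a descending range with step -1 is empty when start ≤ stop
lemma pyRange_nil_of_le (a b : Int) (h : a ≤ b) : PySem.List.pyRange a b (-1) = [] := by
  simp [PySem.List.pyRange]
  omega

-- flatMap over a filtered list is a guarded flatMap
lemma flatMap_filter {beta : Type} (p : Int -> Bool) (g : Int -> List beta) (l : List Int) :
    (l.filter p).flatMap g = l.flatMap (fun s => if p s then g s else []) := by
  induction l with
  | nil => rfl
  | cons x t ih => cases h : p x <;> simp [List.filter_cons, h, ih]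

-- B's strong range enumerates exactly the score classes ≥ min_score, descending
lemma pyRange_strong (min_score : Int) :
    PySem.List.pyRange 23 (max min_score 0 - 1) (-1)
      = pvDesc.filter (fun s => decide (min_score ≤ s)) := by
  by_cases h : min_score ≤ 0
  · rw [show max min_score 0 - 1 = -1 from by omega, pvDesc_eq_range]
    symm
    rw [List.filter_eq_self]
    intro s hs
    have := (mem_pvDesc s).mp hs
    simp only [decide_eq_true_eq]
    omega
  · by_cases h24 : 24 ≤ min_score
    · rw [show max min_score 0 - 1 = min_score - 1 from by omega,
          pyRange_nil_of_le _ _ (by omega)]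
      symm
      rw [List.filter_eq_nil_iff]
      intro s hs
      have := (mem_pvDesc s).mp hs
      simp only [decide_eq_true_eq, not_le]
      omega
    · push_neg at h h24
      interval_cases min_score <;> decide

-- ===== VERDICT (by name: the statement is the Claim_ definition above) =====
theorem filter_price_relevant_news_spec : Claim_equal_filter_price_relevant_news := by
  intro items ticker max_items min_score _hdom
  unfold Spec_filter_price_relevant_news
  simp only [filter_price_relevant_news, filter_price_relevant_news_alt]
  -- A side: scored list is a filtered map
  rw [foldl_skip]
  simp only [List.nil_append]
  -- A side: the stable sort is the class-wise concatenation over pvDesc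
  have hmem : forall p, p ∈ (items.filter
        (fun it => !(PySem.Dict.mk it).contains "error")).map
        (fun it => (score_price_relevance it ticker, it)) -> p.1 ∈ pvDesc := by
    intro p hp
    obtain ⟨it, hit, rfl⟩ := List.mem_map.mp hp
    have hb := score_bounds it ticker
    dsimp only
    exact (mem_pvDesc (score_price_relevance it ticker)).mpr ⟨hb.1, hb.2⟩
  rw [sorted_eq_flatMap _ pvDesc pvDesc_pairwise hmem]
  -- A side: strong and weak pipelines
  rw [PySem.List.foldl_append_ite (fun (x : Int × List (String × String)) => min_score ≤ x.1)
      (fun x => x.2), PySem.List.foldl_append_singleton_eq_map]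
  simp only [List.nil_append]
  rw [List.filter_flatMap, List.map_flatMap, List.map_flatMap]
  rw [List.flatMap_congr (fun s (_ : s ∈ pvDesc) =>
        pieceA_gen items (fun it => score_price_relevance it ticker)
          (fun it => (PySem.Dict.mk it).contains "error") min_score s),
      List.flatMap_congr (fun s (_ : s ∈ pvDesc) =>
        pieceA_gen_noguard items (fun it => score_price_relevance it ticker)
          (fun it => (PySem.Dict.mk it).contains "error") s)]
  -- B side: replace B's score by A's, the strong range by a filtered pvDesc, the weak range by pvDesc
  simp only [pvScoreAlt_eq]
  rw [pyRange_strong, pvDesc_eq_range,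
      flatMap_filter (fun s => decide (min_score ≤ s))]
  -- both sides: each class extraction is the canonical class
  have hB : List.flatMap (fun s => if decide (min_score ≤ s) = true then
        ((((items.filter (fun it => !((PySem.Dict.mk it).contains "error"))).map
            (fun it => (score_price_relevance it ticker, it))).filter
              (fun p => p.1 == s)).map (fun p => p.2)) else []) pvDesc =
      List.flatMap (fun s => if min_score ≤ s then pvBucket items ticker s else []) pvDesc := by
    refine List.flatMap_congr (fun s _ => ?_)
    rw [pieceB items ticker s]
    simp only [decide_eq_true_eq]
  have hBw : List.flatMap (fun s =>
        ((((items.filter (fun it => !((PySem.Dict.mk it).contains "error"))).map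
            (fun it => (score_price_relevance it ticker, it))).filter
              (fun p => p.1 == s)).map (fun p => p.2))) pvDesc =
      List.flatMap (fun s => pvBucket items ticker s) pvDesc := by
    refine List.flatMap_congr (fun s _ => pieceB items ticker s)
  rw [hB, hBw]
  simp only [pvBucket]
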